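-- pv_equiv track=rewrite | github.com/DiamonDinoia/simdref | src/simdref/search.py | _token_overlap_count
-- ===== SOURCE A (Python) =====
-- def _token_overlap_count(query_tokens: list[str], candidate_tokens: list[str]) -> int:
--     if not query_tokens or not candidate_tokens:
--         return 0
--     count = 0
--     for q in query_tokens:
--         if any(token == q or token.startswith(q) or q.startswith(token) for token in candidate_tokens):
--             count += 1
--     return count
-- ===== SOURCE B (Python) =====
-- def _token_overlap_count(query_tokens: list[str], candidate_tokens: list[str]) -> int:
--     if not query_tokens or not candidate_tokens:
--         return 0
--     cand = set(candidate_tokens)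
--     prefixes = set()
--     for c in candidate_tokens:
--         for i in range(len(c) + 1):
--             prefixes.add(c[:i])
--     count = 0
--     for q in query_tokens:
--         if q in prefixes or any(q[:i] in cand for i in range(len(q) + 1)):
--             count += 1
--     return count
-- ===== Notes on version B (the rewrite author's own statement) =====
-- stated objective: faster
-- what changed: Replaces the per-query scan of all candidates with two hash sets built once (the candidates and all prefixes of candidates), so each query token is decided by O(len(q)) set lookups instead of a pass over every candidate.
import Mathlib
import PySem

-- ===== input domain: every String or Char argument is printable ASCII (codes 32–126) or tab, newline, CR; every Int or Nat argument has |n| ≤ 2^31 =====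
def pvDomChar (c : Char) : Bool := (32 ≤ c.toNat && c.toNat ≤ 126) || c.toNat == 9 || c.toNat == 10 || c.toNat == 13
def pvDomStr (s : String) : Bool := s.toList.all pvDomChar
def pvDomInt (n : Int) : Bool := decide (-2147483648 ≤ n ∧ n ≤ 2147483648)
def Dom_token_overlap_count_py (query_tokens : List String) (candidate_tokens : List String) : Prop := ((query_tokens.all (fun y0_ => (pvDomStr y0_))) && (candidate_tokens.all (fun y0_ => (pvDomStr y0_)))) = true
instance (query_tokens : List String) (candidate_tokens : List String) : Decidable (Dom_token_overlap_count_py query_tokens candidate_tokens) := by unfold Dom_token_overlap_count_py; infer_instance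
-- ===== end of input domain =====

-- B replaces A's per-query scan over all candidates by two sets built once (candidates and all their prefixes); objective: faster.
-- ===== PORT A =====
-- A: for each query token, scan ALL candidate tokens for equality / either-way prefix match.
def token_overlap_count_py (query_tokens : List String) (candidate_tokens : List String) : Int :=
  if query_tokens = [] ∨ candidate_tokens = [] then 0
  else
    query_tokens.foldl (fun count q =>
      if candidate_tokens.any (fun token =>
           token == q || PySem.Str.startswith token q || PySem.Str.startswith q token)
      then count + 1 else count) 0

-- ===== PORT B =====
-- B: build once a hash set of the candidates and a hash set of ALL prefixes of candidates;
-- a query token matches iff it is in the prefix set (some candidate starts with it) or one of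
-- its own prefixes is a candidate (it starts with some candidate). The inner scan of A disappears.
def pvPrefixSet (candidate_tokens : List String) : PySem.Set String :=
  candidate_tokens.foldl (fun s c =>
    (PySem.List.pyRange 0 ((PySem.Str.len c : Int) + 1) 1).foldl
      (fun s i => PySem.Set.add s (PySem.Str.slice c none (some i))) s) PySem.Set.empty

def token_overlap_count_py_alt (query_tokens : List String) (candidate_tokens : List String) : Int :=
  if query_tokens = [] ∨ candidate_tokens = [] then 0
  else
    let cand : PySem.Set String := PySem.Set.ofList candidate_tokens
    let prefixes : PySem.Set String := pvPrefixSet candidate_tokens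
    query_tokens.foldl (fun count q =>
      if PySem.Set.contains prefixes q ||
         (PySem.List.pyRange 0 ((PySem.Str.len q : Int) + 1) 1).any
           (fun i => PySem.Set.contains cand (PySem.Str.slice q none (some i)))
      then count + 1 else count) 0

-- ===== PRECONDITION & SPEC =====
def Spec_token_overlap_count_py (query_tokens : List String) (candidate_tokens : List String) (out : Int) : Prop := out = token_overlap_count_py_alt query_tokens candidate_tokens
instance (query_tokens : List String) (candidate_tokens : List String) (out : Int) : Decidable (Spec_token_overlap_count_py query_tokens candidate_tokens out) := by unfold Spec_token_overlap_count_py; infer_instance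

-- ===== CLAIM (what is proved, stated in full; the proofs are below) =====
def Claim_equal_token_overlap_count_py : Prop := ∀ (query_tokens : List String) (candidate_tokens : List String), Dom_token_overlap_count_py query_tokens candidate_tokens → Spec_token_overlap_count_py query_tokens candidate_tokens (token_overlap_count_py query_tokens candidate_tokens)

-- ===== LEMMAS AND PROOFS =====

-- a list prefix is exactly a take of the longer list
theorem pv_prefix_iff_take (p s : List Char) : p <+: s ↔ ∃ i, i ≤ s.length ∧ s.take i = p := by
  constructor
  · intro h; exact ⟨p.length, h.length_le, (List.prefix_iff_eq_take.mp h).symm⟩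
  · rintro ⟨i, _, rfl⟩; exact List.take_prefix i s

-- membership in a fold that adds f x for each x of l
theorem pv_mem_foldl_add {α β : Type} [BEq α] [LawfulBEq α] (f : β → α) (l : List β)
    (s : PySem.Set α) (y : α) :
    y ∈ l.foldl (fun s x => PySem.Set.add s (f x)) s ↔ y ∈ s ∨ ∃ x ∈ l, f x = y := by
  induction l generalizing s with
  | nil => simp
  | cons a t ih =>
    simp only [List.foldl_cons, ih, PySem.Set.mem_add, List.mem_cons]
    constructor
    · rintro (⟨h | h⟩ | ⟨x, hx, hfx⟩)
      · exact Or.inl h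
      · exact Or.inr ⟨a, Or.inl rfl, h.symm⟩
      · exact Or.inr ⟨x, Or.inr hx, hfx⟩
    · rintro (h | ⟨x, (rfl | hx), hfx⟩)
      · exact Or.inl (Or.inl h)
      · exact Or.inl (Or.inr hfx.symm)
      · exact Or.inr ⟨x, hx, hfx⟩

-- toList of the slice c[:i] for 0 ≤ i
theorem pv_toList_slice (c : String) (i : Int) (h : 0 ≤ i) :
    (PySem.Str.slice c none (some i)).toList = c.toList.take i.toNat := by
  rw [PySem.Str.toList_slice, PySem.Chars.slice_eq_listSlice, PySem.List.slice_to _ h]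

-- the i-th slice of c, 0 ≤ i ≤ len c, equals q iff q is a prefix of c (as strings)
theorem pv_slice_eq_iff (c q : String) :
    (∃ i, i ∈ PySem.List.pyRange 0 ((PySem.Str.len c : Int) + 1) 1 ∧
        PySem.Str.slice c none (some i) = q) ↔ q.toList <+: c.toList := by
  rw [pv_prefix_iff_take]
  constructor
  · rintro ⟨i, hi, rfl⟩
    rw [PySem.List.mem_pyRange_one] at hi
    refine ⟨i.toNat, ?_, (pv_toList_slice c i hi.1).symm⟩
    rw [PySem.Str.len_eq] at hi; omega
  · rintro ⟨i, hle, htake⟩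
    refine ⟨(i : Int), ?_, ?_⟩
    · rw [PySem.List.mem_pyRange_one, PySem.Str.len_eq]; omega
    · apply String.toList_inj.mp
      rw [pv_toList_slice c (i : Int) (by omega)]
      simpa using htake

-- membership in the nested fold that builds the prefix set, any start
theorem pv_mem_prefixFold (cs : List String) (s : PySem.Set String) (q : String) :
    q ∈ cs.foldl (fun s c =>
        (PySem.List.pyRange 0 ((PySem.Str.len c : Int) + 1) 1).foldl
          (fun s i => PySem.Set.add s (PySem.Str.slice c none (some i))) s) s
    ↔ q ∈ s ∨ ∃ c ∈ cs, q.toList <+: c.toList := by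
  induction cs generalizing s with
  | nil => simp
  | cons c t ih =>
    simp only [List.foldl_cons, ih, pv_mem_foldl_add, List.mem_cons]
    constructor
    · rintro (⟨h | ⟨i, hi, hsl⟩⟩ | ⟨x, hx, hp⟩)
      · exact Or.inl h
      · exact Or.inr ⟨c, Or.inl rfl, (pv_slice_eq_iff c q).mp ⟨i, hi, hsl⟩⟩
      · exact Or.inr ⟨x, Or.inr hx, hp⟩
    · rintro (h | ⟨x, (rfl | hx), hp⟩)
      · exact Or.inl (Or.inl h)
      · exact Or.inl (Or.inr ((pv_slice_eq_iff x q).mpr hp))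
      · exact Or.inr ⟨x, hx, hp⟩

-- membership in the prefix set built by B
theorem pv_mem_prefixSet (cs : List String) (q : String) :
    q ∈ pvPrefixSet cs ↔ ∃ c ∈ cs, q.toList <+: c.toList := by
  unfold pvPrefixSet
  rw [pv_mem_prefixFold]
  simp [PySem.Set.empty]

-- B's per-query test equals A's per-query test
theorem pv_test_eq (cs : List String) (q : String) :
    (PySem.Set.contains (pvPrefixSet cs) q ||
      (PySem.List.pyRange 0 ((PySem.Str.len q : Int) + 1) 1).any
        (fun i => PySem.Set.contains (PySem.Set.ofList cs) (PySem.Str.slice q none (some i))))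
    = cs.any (fun token =>
        token == q || PySem.Str.startswith token q || PySem.Str.startswith q token) := by
  rw [Bool.eq_iff_iff]
  simp only [Bool.or_eq_true, List.any_eq_true, PySem.Set.contains_iff, PySem.Set.mem_ofList,
    beq_iff_eq, PySem.Str.startswith_eq, PySem.Chars.startswith_iff, pv_mem_prefixSet]
  constructor
  · rintro (⟨c, hc, hp⟩ | ⟨i, hi, hmem⟩)
    · exact ⟨c, hc, Or.inl (Or.inr hp)⟩
    · exact ⟨_, hmem, Or.inr ((pv_slice_eq_iff q (PySem.Str.slice q none (some i))).mp ⟨i, hi, rfl⟩)⟩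
  · rintro ⟨t, ht, ((rfl | hqp) | htp)⟩
    · exact Or.inl ⟨t, ht, List.prefix_refl _⟩
    · exact Or.inl ⟨t, ht, hqp⟩
    · refine Or.inr ?_
      rcases (pv_slice_eq_iff q t).mpr htp with ⟨i, hi, hsl⟩
      exact ⟨i, hi, hsl ▸ ht⟩

-- ===== VERDICT (by name: the statement is the Claim_ definition above) =====
theorem token_overlap_count_py_spec : Claim_equal_token_overlap_count_py := by
  intro qs cs _
  unfold Spec_token_overlap_count_py token_overlap_count_py token_overlap_count_py_alt
  split
  · rfl
  · simp only [pv_test_eq]
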